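-- pv_equiv track=rewrite | github.com/andy0124/CodingTestPractice | Untitled-1.py | solution
-- ===== SOURCE A (Python) =====
-- def solution(new_id):
--     answer = ''
--
--     #1단계
--     new_id_low = new_id.lower()
--     #2단계
--     new_id_eli = []
--     for ch in new_id_low :
--         if not ((ch >= 'a' and ch <= 'z') or ch == '-' or ch == '_' or ch == '.' or (ch >= '0' and ch <= '9')) :
--             continue
--         new_id_eli.append(ch)
--
--     #3단계
--     beforeCh = ''
--     new_id_dup = []
--     for idx, ch in enumerate(new_id_eli):
--         if idx == 0 :
--             beforeCh = ch
--             new_id_dup.append(ch)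
--             continue
--         if ch == '.' and beforeCh == '.' :
--             continue
--         new_id_dup.append(ch)
--         beforeCh = ch
--
--     #4단계
--     if new_id_dup and new_id_dup[0] == '.' : new_id_dup.pop(0)
--     if new_id_dup and new_id_dup[-1] == '.' : new_id_dup.pop(-1)
--
--     #5단계
--     if not new_id_dup :
--         new_id_dup = ['a']
--
--     #6단계
--     new_id_cut = ""
--     if len(new_id_dup) > 15 :
--         new_id_cut = new_id_dup[0:15]
--     else :
--         new_id_cut = new_id_dup
--
--     #7단계
--     while len(new_id_cut) <= 2 :
--         new_id_cut.append(new_id_cut[-1])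
--
--     answer = ''.join(new_id_cut)
--
--
--     return answer
-- ===== SOURCE B (Python) =====
-- def solution(new_id):
--     # Split/join algorithm: keep allowed chars, then split on '.' and re-join the
--     # non-empty segments with single dots -- this collapses dot runs AND strips
--     # leading/trailing dots in one step, with no stateful dedup loop.
--     kept = ''.join(c for c in new_id.lower()
--                    if 'a' <= c <= 'z' or '0' <= c <= '9' or c in '-_.')
--     s = ('.'.join(p for p in kept.split('.') if p) or 'a')[:15]
--     return s + s[-1] * (3 - len(s))
-- ===== Notes on version B (the rewrite author's own statement) =====
-- stated objective: idiomatic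
-- what changed: A's stateful consecutive-dot dedup loop over an enumerated list plus pop(0)/pop(-1) stripping is replaced by a split-on-dot / re-join algorithm: split the filtered string on the dot character, keep the non-empty segments and join them back with single dots, which collapses dot runs and strips boundary dots in one library step; then an or-default, a slice, and pad-by-string-multiplication.
import Mathlib
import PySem

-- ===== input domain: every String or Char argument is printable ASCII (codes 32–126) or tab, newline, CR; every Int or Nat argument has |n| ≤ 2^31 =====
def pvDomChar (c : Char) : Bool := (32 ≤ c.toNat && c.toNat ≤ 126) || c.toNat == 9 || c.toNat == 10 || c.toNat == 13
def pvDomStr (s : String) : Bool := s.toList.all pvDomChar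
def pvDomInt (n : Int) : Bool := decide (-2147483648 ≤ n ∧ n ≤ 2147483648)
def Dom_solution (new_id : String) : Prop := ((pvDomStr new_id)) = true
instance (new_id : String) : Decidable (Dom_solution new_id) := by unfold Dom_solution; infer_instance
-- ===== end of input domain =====

-- B replaces A's stateful dedup loop and pop-based stripping by a split-on-dot /
-- re-join algorithm: joining the nonempty segments with single dots collapses dot
-- runs and strips the boundary dots in one step; same output (objective: idiomatic).


-- ===== PORT A =====
-- step 2's keep-condition
def pvAllowedA (ch : Char) : Bool :=
  ('a' ≤ ch && ch ≤ 'z') || ch == '-' || ch == '_' || ch == '.' || ('0' ≤ ch && ch ≤ '9')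

-- step 3's loop; beforeCh carried as a parameter, the idx == 0 case is the head case of pvDedupA
def pvDedupGo (beforeCh : Char) : List Char → List Char
  | [] => []
  | ch :: rest =>
      if ch == '.' && beforeCh == '.' then pvDedupGo beforeCh rest
      else ch :: pvDedupGo ch rest

def pvDedupA : List Char → List Char
  | [] => []
  | ch :: rest => ch :: pvDedupGo ch rest

-- step 4's two pops: `new_id_dup and new_id_dup[0]=='.'` ⇔ head? = some '.', and the mirror at the end
def pvPop0 (l : List Char) : List Char := if l.head? == some '.' then l.drop 1 else l
def pvPopLast (l : List Char) : List Char := if l.getLast? == some '.' then l.dropLast else l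

-- step 7's while-loop; `new_id_cut[-1]` via pyGet? (none branch unreachable: the list is nonempty after step 5)
def pvPadA (l : List Char) : List Char :=
  if _h : l.length ≤ 2 then
    match PySem.List.pyGet? l (-1) with
    | some c => pvPadA (l ++ [c])
    | none => l
  else l
termination_by 3 - l.length
decreasing_by simp; omega

def solution (new_id : String) : String :=
  let low := (PySem.Str.lower new_id).toList                               -- 1단계
  let eli := low.filter pvAllowedA                                          -- 2단계
  let dup := pvDedupA eli                                                   -- 3단계
  let dup2 := pvPopLast (pvPop0 dup)                                        -- 4단계
  let dup3 := if dup2 == [] then ['a'] else dup2                            -- 5단계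
  let cut := if dup3.length > 15 then PySem.List.slice dup3 (some 0) (some 15) else dup3   -- 6단계
  String.ofList (pvPadA cut)                                                -- 7단계 + join

-- ===== PORT B =====
-- `'a' <= c <= 'z' or '0' <= c <= '9' or c in '-_.'`
def pvKeepB (c : Char) : Bool :=
  ('a' ≤ c && c ≤ 'z') || ('0' ≤ c && c ≤ '9') || c == '-' || c == '_' || c == '.'

def solution_alt (new_id : String) : String :=
  let kept := (PySem.Str.lower new_id).toList.filter pvKeepB                -- ''.join(c for c in new_id.lower() if …)
  let parts := (PySem.Chars.splitOn kept ['.']).filter (fun p => !p.isEmpty)  -- kept.split('.'), keep truthy pieces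
  let j := PySem.Chars.join ['.'] parts                                     -- '.'.join(…)
  let s := if j == [] then ['a'] else j                                     -- (… or 'a')
  let s15 := PySem.List.slice s none (some 15)                              -- [:15]
  match PySem.List.pyGet? s15 (-1) with                                     -- s + s[-1] * (3 - len(s))
  | some c => String.ofList (s15 ++ List.replicate (3 - s15.length) c)
  | none => String.ofList s15

-- ===== PRECONDITION & SPEC =====
def Spec_solution (new_id : String) (out : String) : Prop := out = solution_alt new_id
instance (new_id : String) (out : String) : Decidable (Spec_solution new_id out) := by unfold Spec_solution; infer_instance

-- ===== CLAIM (what is proved, stated in full; the proofs are below) =====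
def Claim_equal_solution : Prop := ∀ (new_id : String), Dom_solution new_id → Spec_solution new_id (solution new_id)

-- ===== LEMMAS AND PROOFS =====

-- the two keep-conditions agree
lemma allowed_char (c : Char) : pvAllowedA c = pvKeepB c := by
  unfold pvAllowedA pvKeepB
  cases h1 : (decide ('a' ≤ c)) <;> cases h2 : (decide (c ≤ 'z')) <;>
    cases h3 : (c == '-') <;> cases h4 : (c == '_') <;> cases h5 : (c == '.') <;>
    cases h6 : (decide ('0' ≤ c)) <;> cases h7 : (decide (c ≤ '9')) <;>
    simp_all

-- A's dedup with an optional "previous char" (none before the first kept char)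
def pvDedupOpt (b : Option Char) : List Char → List Char
  | [] => []
  | c :: cs =>
      if c == '.' && b == some '.' then pvDedupOpt b cs
      else c :: pvDedupOpt (some c) cs

lemma dedupGo_eq_opt (b : Char) (l : List Char) :
    pvDedupGo b l = pvDedupOpt (some b) l := by
  induction l generalizing b with
  | nil => rfl
  | cons c cs ih =>
      cases hc : (c == '.') <;> cases hb : (b == '.') <;>
        simp_all [pvDedupGo, pvDedupOpt]

lemma dedupA_eq_opt (l : List Char) : pvDedupA l = pvDedupOpt none l := by
  cases l with
  | nil => rfl
  | cons c cs => simp [pvDedupA, pvDedupOpt, dedupGo_eq_opt]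

lemma dOpt_nondot {c : Char} (h : (c == '.') = false) (t : List Char) :
    pvDedupOpt (some c) t = pvDedupOpt none t := by
  cases t with
  | nil => rfl
  | cons x r => simp [pvDedupOpt, h]

-- the common normal form: a 3-state automaton (emitted yet?, dot pending?)
def pvNf (emitted pending : Bool) : List Char → List Char
  | [] => []
  | c :: t => if c = '.' then pvNf emitted emitted t
              else (if pending then ['.'] else []) ++ c :: pvNf true false t

lemma nf2_eq (t : List Char) :
    pvNf true true t = if pvNf false false t = [] then [] else '.' :: pvNf false false t := by
  induction t with
  | nil => simp [pvNf]
  | cons c u ih =>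
      by_cases hc : c = '.'
      · simp [pvNf, hc, ih]
      · simp [pvNf, hc]

-- ===== A-side: strip ∘ dedup = normal form =====

lemma Lcont (t : List Char) : ∀ (pending : Bool) (p : List Char), p ≠ [] →
    (p.getLast? == some '.') = false →
    pvPopLast (p ++ (if pending then '.' :: pvDedupOpt (some '.') t else pvDedupOpt none t)) =
      p ++ pvNf true pending t := by
  induction t with
  | nil =>
      intro pending p hp hlast
      cases pending
      · simp [pvPopLast, pvDedupOpt, pvNf, hlast]
      · simp [pvPopLast, pvDedupOpt, pvNf]
  | cons c u ih =>
      intro pending p hp hlast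
      by_cases hc : c = '.'
      · subst hc
        cases pending
        · have : pvDedupOpt none ('.' :: u) = '.' :: pvDedupOpt (some '.') u := by
            simp [pvDedupOpt]
          rw [if_neg (by simp)] at *
          rw [this]
          have := ih true p hp hlast
          rw [if_pos rfl] at this
          rw [this]; simp [pvNf]
        · have : pvDedupOpt (some '.') ('.' :: u) = pvDedupOpt (some '.') u := by
            simp [pvDedupOpt]
          rw [if_pos rfl] at *
          rw [this]
          have := ih true p hp hlast
          rw [if_pos rfl] at this
          rw [this]; simp [pvNf]
      · have hcb : (c == '.') = false := by simp [hc]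
        cases pending
        · have h1 : pvDedupOpt none (c :: u) = c :: pvDedupOpt none u := by
            simp [pvDedupOpt, hcb, dOpt_nondot hcb]
          rw [if_neg (by simp)]
          rw [h1]
          have := ih false (p ++ [c]) (by simp) (by simp [hcb])
          rw [if_neg (by simp)] at this
          rw [show p ++ c :: pvDedupOpt none u = (p ++ [c]) ++ pvDedupOpt none u by simp]
          rw [this]; simp [pvNf, hc]
        · have h1 : pvDedupOpt (some '.') (c :: u) = c :: pvDedupOpt none u := by
            simp [pvDedupOpt, hcb, dOpt_nondot hcb]
          rw [if_pos rfl, h1]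
          have := ih false (p ++ ['.', c]) (by simp) (by simp [hcb])
          rw [if_neg (by simp)] at this
          rw [show p ++ '.' :: c :: pvDedupOpt none u = (p ++ ['.', c]) ++ pvDedupOpt none u by simp]
          rw [this]; simp [pvNf, hc]

lemma asideDot (t : List Char) :
    pvPopLast (pvDedupOpt (some '.') t) = pvNf false false t := by
  induction t with
  | nil => simp [pvPopLast, pvDedupOpt, pvNf]
  | cons c u ih =>
      by_cases hc : c = '.'
      · subst hc; simpa [pvDedupOpt, pvNf] using ih
      · have hcb : (c == '.') = false := by simp [hc]
        have h1 : pvDedupOpt (some '.') (c :: u) = c :: pvDedupOpt none u := by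
          simp [pvDedupOpt, hcb, dOpt_nondot hcb]
        rw [h1]
        have := Lcont u false [c] (by simp) (by simp [hcb])
        rw [if_neg (by simp)] at this
        simpa [pvNf, hc] using this

lemma aside (l : List Char) :
    pvPopLast (pvPop0 (pvDedupOpt none l)) = pvNf false false l := by
  cases l with
  | nil => simp [pvPop0, pvPopLast, pvDedupOpt, pvNf]
  | cons c t =>
      by_cases hc : c = '.'
      · subst hc
        have h1 : pvDedupOpt none ('.' :: t) = '.' :: pvDedupOpt (some '.') t := by
          simp [pvDedupOpt]
        rw [h1]
        simp only [pvPop0, List.head?_cons, beq_self_eq_true, if_pos, List.drop_one,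
          List.tail_cons]
        simpa [pvNf] using asideDot t
      · have hcb : (c == '.') = false := by simp [hc]
        have h1 : pvDedupOpt none (c :: t) = c :: pvDedupOpt none t := by
          simp [pvDedupOpt, hcb, dOpt_nondot hcb]
        rw [h1]
        have h2 : pvPop0 (c :: pvDedupOpt none t) = c :: pvDedupOpt none t := by
          simp [pvPop0, hcb]
        rw [h2]
        have := Lcont t false [c] (by simp) (by simp [hcb])
        rw [if_neg (by simp)] at this
        simpa [pvNf, hc] using this

-- ===== B-side: split / filter / join = normal form =====

-- the value computed by splitOn's fuelled loop
def pvSp (cur : List Char) : List Char → List (List Char)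
  | [] => [cur.reverse]
  | c :: t => if c = '.' then cur.reverse :: pvSp [] t else pvSp (c :: cur) t

lemma go_eq_sp (fuel : Nat) : ∀ (l cur : List Char) (acc : List (List Char)),
    l.length ≤ fuel →
    PySem.Chars.splitOn.go ['.'] fuel l cur acc = acc.reverse ++ pvSp cur l := by
  induction fuel with
  | zero =>
      intro l cur acc hl
      have : l = [] := by cases l <;> simp_all
      subst this
      rw [PySem.Chars.splitOn.go.eq_def]; simp [pvSp]
  | succ n ih =>
      intro l cur acc hl
      cases l with
      | nil => rw [PySem.Chars.splitOn.go.eq_def]; simp [pvSp]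
      | cons c rest =>
          rw [PySem.Chars.splitOn.go.eq_def]
          by_cases hc : c = '.'
          · subst hc
            have hpre : (['.'].isPrefixOf ('.' :: rest)) = true := by
              simp [List.isPrefixOf]
            simp only [hpre, if_pos]
            have hdrop : List.drop (['.'].length) ('.' :: rest) = rest := rfl
            rw [hdrop, ih rest [] (cur.reverse :: acc)
              (by simpa using Nat.lt_succ_iff.mp (by simpa using hl))]
            simp [pvSp]
          · have hpre : (['.'].isPrefixOf (c :: rest)) = false := by
              simp [List.isPrefixOf]; exact fun h => (hc h.symm).elim
            simp only [hpre]
            rw [if_neg (by simp)]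
            rw [ih rest (c :: cur) acc (by simpa using Nat.lt_succ_iff.mp (by simpa using hl))]
            simp [pvSp, hc]

lemma splitOn_eq_sp (l : List Char) : PySem.Chars.splitOn l ['.'] = pvSp [] l := by
  unfold PySem.Chars.splitOn
  rw [go_eq_sp (l.length + 1) l [] [] (by omega)]
  rfl

-- '.'.join written as a recursion
def pvJn : List (List Char) → List Char
  | [] => []
  | [a] => a
  | a :: b :: r => a ++ '.' :: pvJn (b :: r)

lemma join_eq_jn (parts : List (List Char)) : PySem.Chars.join ['.'] parts = pvJn parts := by
  induction parts with
  | nil => rfl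
  | cons a r ih =>
      cases r with
      | nil => simp [PySem.Chars.join, List.intercalate, pvJn]
      | cons b s =>
          simp only [pvJn, ← ih]
          simp [PySem.Chars.join, List.intercalate]

lemma jn_ne (parts : List (List Char)) (h0 : parts ≠ []) (h1 : ∀ p ∈ parts, p ≠ []) :
    pvJn parts ≠ [] := by
  match parts with
  | [a] => simpa [pvJn] using h1 a (by simp)
  | a :: b :: r =>
      simp [pvJn]

lemma rside (l : List Char) : ∀ (cur : List Char),
    pvJn ((pvSp cur l).filter (fun p => !p.isEmpty)) =
      if cur = [] then pvNf false false l else cur.reverse ++ pvNf true false l := by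
  induction l with
  | nil =>
      intro cur
      cases cur <;> simp [pvSp, pvJn, pvNf]
  | cons c t ih =>
      intro cur
      by_cases hc : c = '.'
      · subst hc
        cases cur with
        | nil =>
            have iht := ih []
            rw [if_pos rfl] at iht
            have hsp : pvSp [] ('.' :: t) = [] :: pvSp [] t := by simp [pvSp]
            rw [hsp, if_pos rfl]
            have hfc : (([] : List Char) :: pvSp [] t).filter (fun p => !p.isEmpty) =
                (pvSp [] t).filter (fun p => !p.isEmpty) := by simp
            rw [hfc, iht]
            simp [pvNf]
        | cons x xs =>
            have iht := ih []
            rw [if_pos rfl] at iht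
            have hsp : pvSp (x :: xs) ('.' :: t) = (x :: xs).reverse :: pvSp [] t := by
              simp [pvSp]
            rw [hsp, if_neg (by simp)]
            have hfc : ((x :: xs).reverse :: pvSp [] t).filter (fun p => !p.isEmpty) =
                (x :: xs).reverse :: (pvSp [] t).filter (fun p => !p.isEmpty) := by
              simp
            rw [hfc]
            have hnfs : pvNf true false ('.' :: t) = pvNf true true t := by simp [pvNf]
            rw [hnfs]
            rcases hFt : (pvSp [] t).filter (fun p => !p.isEmpty) with _ | ⟨y, ys⟩
            · rw [hFt] at iht
              have hnf : pvNf false false t = [] := by rw [← iht]; rfl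
              rw [nf2_eq, if_pos hnf, hFt]
              simp [pvJn]
            · rw [hFt] at iht
              have hne : pvJn (y :: ys) ≠ [] := by
                apply jn_ne _ (by simp)
                intro p hp
                have hmem : p ∈ (pvSp [] t).filter (fun p => !p.isEmpty) := by
                  rw [hFt]; exact hp
                simpa using List.of_mem_filter hmem
              have hnf : pvNf false false t ≠ [] := by rw [← iht]; exact hne
              rw [nf2_eq, if_neg hnf, ← iht, hFt]
              simp [pvJn]
      · have h1 : pvSp cur (c :: t) = pvSp (c :: cur) t := by simp [pvSp, hc]
        rw [h1, ih (c :: cur), if_neg (by simp)]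
        cases cur <;> simp [pvNf, hc]

-- ===== the core equality and the shared tail steps =====

lemma core (l : List Char) :
    pvPopLast (pvPop0 (pvDedupA l)) =
      PySem.Chars.join ['.'] ((PySem.Chars.splitOn l ['.']).filter (fun p => !p.isEmpty)) := by
  rw [dedupA_eq_opt, aside, splitOn_eq_sp, join_eq_jn]
  have h := rside l []
  rw [if_pos rfl] at h
  exact h.symm

-- step 6 vs [:15]
lemma cut_eq (d : List Char) :
    (if d.length > 15 then PySem.List.slice d (some 0) (some 15) else d) =
      PySem.List.slice d none (some 15) := by
  have h15 : PySem.List.slice d none (some 15) = d.take (15 : Int).toNat :=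
    PySem.List.slice_to d (by norm_num)
  rw [PySem.List.slice_zero_start, h15]
  by_cases h : d.length > 15
  · simp [h]
  · simp only [h, if_false]
    rw [List.take_of_length_le (by simp at h ⊢; omega)]

-- step 7 vs the pad-by-multiplication
lemma pad_eq (l : List Char) :
    pvPadA l = (match PySem.List.pyGet? l (-1) with
                | some c => l ++ List.replicate (3 - l.length) c
                | none => l) := by
  match l with
  | [] => unfold pvPadA; simp [PySem.List.pyGet?]
  | [a] =>
      unfold pvPadA; unfold pvPadA; unfold pvPadA
      simp [PySem.List.pyGet?_neg_one]
  | [a, b] =>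
      unfold pvPadA; unfold pvPadA
      simp [PySem.List.pyGet?_neg_one]
  | a :: b :: c :: rest =>
      unfold pvPadA
      have hlen : ¬ ((a :: b :: c :: rest).length ≤ 2) := by simp
      simp only [hlen, dite_false]
      cases h : PySem.List.pyGet? (a :: b :: c :: rest) (-1) with
      | none => rfl
      | some x => simp

lemma finish (d : List Char) :
    String.ofList (pvPadA (if (if d == [] then ['a'] else d).length > 15
        then PySem.List.slice (if d == [] then ['a'] else d) (some 0) (some 15)
        else if d == [] then ['a'] else d)) =
      (match PySem.List.pyGet? (PySem.List.slice (if d == [] then ['a'] else d) none (some 15)) (-1) with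
       | some c => String.ofList (PySem.List.slice (if d == [] then ['a'] else d) none (some 15) ++
           List.replicate (3 - (PySem.List.slice (if d == [] then ['a'] else d) none (some 15)).length) c)
       | none => String.ofList (PySem.List.slice (if d == [] then ['a'] else d) none (some 15))) := by
  generalize (if d == [] then ['a'] else d) = s
  rw [cut_eq, pad_eq]
  cases h : PySem.List.pyGet? (PySem.List.slice s none (some 15)) (-1) <;> simp_all

-- ===== VERDICT (by name: the statement is the Claim_ definition above) =====
set_option maxHeartbeats 1600000 in
theorem solution_spec : Claim_equal_solution := by
  intro new_id _
  show solution new_id = solution_alt new_id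
  unfold solution solution_alt
  have hfil : (PySem.Str.lower new_id).toList.filter pvAllowedA =
      (PySem.Str.lower new_id).toList.filter pvKeepB :=
    List.filter_congr (fun c _ => allowed_char c)
  simp only [hfil]
  rw [core]
  generalize (PySem.Chars.join ['.']
      ((PySem.Chars.splitOn ((PySem.Str.lower new_id).toList.filter pvKeepB) ['.']).filter
        (fun p => !p.isEmpty))) = d
  exact finish d
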